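-- pv_equiv track=rewrite | github.com/jacobmorrin/launchschool_py110 | small_problems/easy_1/numtostring3.py | signed_integer_to_string
-- ===== SOURCE A (Python) =====
-- DIGITS = ['0', '1', '2', '3', '4', '5', '6', '7', '8', '9']
--
-- def signed_integer_to_string(number):
--     result = ''
--     sign = sign_finder(number)
--     number = abs(number)
--
--     while number > 0:
--         number, remainder = divmod(number, 10)
--         result = DIGITS[remainder] + result
--
--     result = sign + result
--
--     return result or '0'
--
-- def sign_finder(number):
--     sign = ''
--     if number > 0:
--         return '+'
--     elif number < 0:
--         return '-'
--     else:
--         return ''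
-- ===== SOURCE B (Python) =====
-- def signed_integer_to_string(number):
--     sign = '+' if number > 0 else '-' if number < 0 else ''
--     return sign + str(abs(number))
-- ===== Notes on version B (the rewrite author's own statement) =====
-- stated objective: simpler
-- what changed: Replaced the manual divmod digit-extraction loop and DIGITS lookup table (plus the '' -> '0' fallback) with a one-line sign guard followed by the built-in int-to-string conversion of the absolute value.
import Mathlib
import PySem

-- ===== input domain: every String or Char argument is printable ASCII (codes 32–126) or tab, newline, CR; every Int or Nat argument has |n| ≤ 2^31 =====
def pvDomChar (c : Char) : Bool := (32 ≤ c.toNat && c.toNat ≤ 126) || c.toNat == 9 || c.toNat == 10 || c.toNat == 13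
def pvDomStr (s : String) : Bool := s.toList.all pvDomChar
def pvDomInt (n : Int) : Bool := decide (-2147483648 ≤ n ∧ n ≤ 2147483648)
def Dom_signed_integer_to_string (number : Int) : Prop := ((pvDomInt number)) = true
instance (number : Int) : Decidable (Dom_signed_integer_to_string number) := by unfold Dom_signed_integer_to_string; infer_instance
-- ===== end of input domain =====

-- B replaces A's manual divmod digit-extraction loop with a sign guard plus the
-- built-in int-to-string conversion of the absolute value (objective: simpler).

-- ===== PORT A =====
-- DIGITS = ['0', ..., '9']
def pvDIGITS : List String := ["0", "1", "2", "3", "4", "5", "6", "7", "8", "9"]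

-- def sign_finder(number): ...
def pvSignFinder (number : Int) : String :=
  if number > 0 then "+"
  else if number < 0 then "-"
  else ""

-- the while loop: number, remainder = divmod(number, 10); result = DIGITS[remainder] + result
-- DIGITS[remainder] via pyGet?; remainder is always 0..9 here so the getD default never fires
def pvLoopA (number : Int) (result : String) : String :=
  if h : number > 0 then
    let q := PySem.Int.floordiv number 10
    let r := PySem.Int.mod number 10
    pvLoopA q (((PySem.List.pyGet? pvDIGITS r).getD "") ++ result)
  else result
termination_by number.toNat
decreasing_by
  have h10 : PySem.Int.floordiv number 10 = number / 10 := by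
    simp [PySem.Int.floordiv, Int.fdiv_eq_ediv]
  simp only [h10]
  omega

def signed_integer_to_string (number : Int) : String :=
  let result := ""
  let sign := pvSignFinder number
  let number := |number|
  let result := pvLoopA number result
  let result := sign ++ result
  if result = "" then "0" else result

-- ===== PORT B =====
def signed_integer_to_string_alt (number : Int) : String :=
  let sign := if number > 0 then "+" else if number < 0 then "-" else ""
  sign ++ PySem.Int.toStr |number|

-- ===== PRECONDITION & SPEC =====
def Spec_signed_integer_to_string (number : Int) (out : String) : Prop := out = signed_integer_to_string_alt number
instance (number : Int) (out : String) : Decidable (Spec_signed_integer_to_string number out) := by unfold Spec_signed_integer_to_string; infer_instance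

-- ===== CLAIM (what is proved, stated in full; the proofs are below) =====
def Claim_equal_signed_integer_to_string : Prop := ∀ (number : Int), Dom_signed_integer_to_string number → Spec_signed_integer_to_string number (signed_integer_to_string number)

-- ===== LEMMAS AND PROOFS =====

-- the digit characters A's loop produces for a nonnegative magnitude, low digit last
def pvChars (n : Nat) : List Char :=
  if h : 0 < n then pvChars (n / 10) ++ [(n % 10).digitChar] else []
termination_by n
decreasing_by omega

theorem pvDIGITS_get (r : Nat) (h : r < 10) :
    (PySem.List.pyGet? pvDIGITS (r : Int)).getD "" = String.ofList [r.digitChar] := by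
  interval_cases r <;> decide

theorem pvLoopA_eq (m : Nat) (result : String) :
    pvLoopA (m : Int) result = String.ofList (pvChars m) ++ result := by
  induction m using Nat.strong_induction_on generalizing result with
  | _ m ih =>
    rw [pvLoopA, pvChars]
    by_cases hm : 0 < m
    · have hpos : (m : Int) > 0 := by exact_mod_cast hm
      have hq : PySem.Int.floordiv (m : Int) 10 = ((m / 10 : Nat) : Int) := by
        simp [PySem.Int.floordiv, Int.fdiv_eq_ediv]
      have hr : PySem.Int.mod (m : Int) 10 = ((m % 10 : Nat) : Int) := by
        simp [PySem.Int.mod, Int.fmod_eq_emod]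
      simp only [hpos, dif_pos hm, hq, hr]
      rw [ih (m / 10) (by omega) , pvDIGITS_get (m % 10) (by omega)]
      simp [String.ofList_append, String.append_assoc]
    · have h0 : ¬ ((m : Int) > 0) := by exact_mod_cast hm
      simp [h0, hm]


theorem toDigitsCore_eq_pvChars (fuel : Nat) : ∀ (n : Nat), 0 < n → n ≤ fuel → ∀ (ds : List Char),
    Nat.toDigitsCore 10 fuel n ds = pvChars n ++ ds := by
  induction fuel with
  | zero => intro n h1 h2; omega
  | succ fuel ih =>
    intro n h1 h2 ds
    rw [Nat.toDigitsCore]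
    by_cases hq : n / 10 = 0
    · simp only [hq, if_pos]
      conv_rhs => rw [pvChars, dif_pos h1, pvChars, hq]
      simp
    · simp only [hq, if_false]
      rw [ih (n / 10) (by omega) (by omega)]
      conv_rhs => rw [pvChars, dif_pos h1]
      simp

theorem toDigits_eq_pvChars (n : Nat) (h : 0 < n) :
    Nat.toDigits 10 n = pvChars n := by
  rw [Nat.toDigits, toDigitsCore_eq_pvChars (n + 1) n h (by omega)]
  simp

theorem abs_toStr (m : Nat) (h : 0 < m) :
    PySem.Int.toStr (m : Int) = String.ofList (pvChars m) := by
  have : ¬ ((m : Int) < 0) := by omega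
  simp [PySem.Int.toStr, PySem.Int.toChars, this, toDigits_eq_pvChars m h]

-- ===== VERDICT (by name: the statement is the Claim_ definition above) =====
theorem signed_integer_to_string_spec : Claim_equal_signed_integer_to_string := by
  intro number _
  unfold Spec_signed_integer_to_string
  simp only [signed_integer_to_string, signed_integer_to_string_alt, pvSignFinder,
    Int.abs_eq_natAbs, pvLoopA_eq]
  rcases lt_trichotomy number 0 with h | h | h
  · have hm : 0 < number.natAbs := by omega
    have h1 : ¬ (number > 0) := by omega
    rw [abs_toStr number.natAbs hm]
    simp [h1, h]
  · subst h
    have h0 : pvChars (Int.natAbs 0) = [] := by rw [pvChars]; simp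
    simp only [h0]
    norm_num [PySem.Int.toStr, PySem.Int.toChars, Nat.toDigits, Nat.toDigitsCore]
    decide
  · have hm : 0 < number.natAbs := by omega
    rw [abs_toStr number.natAbs hm]
    simp [h]
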